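-- pv_equiv track=rewrite | github.com/shelkeom230/striver-DSA-bootcamp | arrays/easy.py | split_array_brute
-- ===== SOURCE A (Python) =====
-- def split_array_brute(arr):
--     n=len(arr)
--     cnt=0
--     for i in range(n):
--         if i==0:
--             left=arr[0]
--         if i==n-1:
--             return cnt
--
--         left=sum(arr[0:i+1])
--         right=sum(arr[i+1:n])
--         if left>=right: cnt+=1
-- ===== SOURCE B (Python) =====
-- def split_array_brute(arr):
--     total = sum(arr)
--     cnt = 0
--     left = 0
--     for x in arr[:-1]:
--         left += x
--         if 2 * left >= total:
--             cnt += 1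
--     return cnt
-- ===== Notes on version B (the rewrite author's own statement) =====
-- stated objective: faster
-- what changed: Replaced the per-index re-summation of both slices with one pass keeping a running prefix sum and comparing it against the precomputed total (left >= right iff 2*left >= total).
-- outside the precondition, e.g. on split_array_brute([]): A returns None, B returns 0
import Mathlib
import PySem

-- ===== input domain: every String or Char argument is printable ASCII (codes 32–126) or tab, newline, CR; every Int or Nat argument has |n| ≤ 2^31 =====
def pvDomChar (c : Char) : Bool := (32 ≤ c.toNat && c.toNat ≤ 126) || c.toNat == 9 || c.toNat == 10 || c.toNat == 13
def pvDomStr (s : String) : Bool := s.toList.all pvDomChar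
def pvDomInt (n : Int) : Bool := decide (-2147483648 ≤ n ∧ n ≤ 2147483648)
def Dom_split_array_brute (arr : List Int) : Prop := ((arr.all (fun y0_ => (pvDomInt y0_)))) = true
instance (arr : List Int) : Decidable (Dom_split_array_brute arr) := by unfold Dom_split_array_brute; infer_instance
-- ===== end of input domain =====

-- B replaces A's per-index re-summation of both slices by a single pass with a running
-- prefix sum compared against the precomputed total (left >= right iff 2*left >= total).

-- ===== PORT A =====
-- loop over the remaining indices of range(n); returns none when the loop falls through
-- (Python returns None there; that happens exactly for arr = [], excluded by Pre_).
def goA (arr : List Int) (n : Int) : List Int → Int → Int → Option Int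
  | [], _cnt, _left => none
  | i :: rest, cnt, left =>
    -- 'if i==0: left=arr[0]' — arr[0] exists whenever the loop runs (n ≥ 1), so getD 0 is never taken
    let _left1 := if i = 0 then (PySem.List.pyGet? arr 0).getD 0 else left
    if i = n - 1 then some cnt
    else
      let l := (PySem.List.slice arr (some 0) (some (i + 1))).sum
      let r := (PySem.List.slice arr (some (i + 1)) (some n)).sum
      goA arr n rest (if l ≥ r then cnt + 1 else cnt) (if l ≥ r then l else l) -- left := l
  -- (left1 is shadowed by the unconditional 'left=sum(arr[0:i+1])' before any later use)

def split_array_brute (arr : List Int) : Int :=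
  (goA arr arr.length (PySem.List.pyRange 0 arr.length 1) 0 0).getD 0

-- ===== PORT B =====
def goB : List Int → Int → Int → Int → Int
  | [], _total, _left, cnt => cnt
  | x :: rest, total, left, cnt =>
    goB rest total (left + x) (if 2 * (left + x) ≥ total then cnt + 1 else cnt)

def split_array_brute_alt (arr : List Int) : Int :=
  goB (PySem.List.slice arr none (some (-1))) arr.sum 0 0

-- ===== PRECONDITION & SPEC =====
-- Pre_ excludes the empty list, on which A falls off its loop and returns None (not an int);
-- B returns 0 there.
def Pre_split_array_brute (arr : List Int) : Prop := arr ≠ []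
instance (arr : List Int) : Decidable (Pre_split_array_brute arr) := by
  unfold Pre_split_array_brute; infer_instance
def pvWitness_split_array_brute : List Int := [1, 2, 3, 1]

def Spec_split_array_brute (arr : List Int) (out : Int) : Prop := out = split_array_brute_alt arr
instance (arr : List Int) (out : Int) : Decidable (Spec_split_array_brute arr out) := by
  unfold Spec_split_array_brute; infer_instance

-- ===== CLAIM (what is proved, stated in full; the proofs are below) =====
def Claim_equal_split_array_brute : Prop := ∀ (arr : List Int), Dom_split_array_brute arr → Pre_split_array_brute arr → Spec_split_array_brute arr (split_array_brute arr)

-- ===== LEMMAS AND PROOFS =====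

-- Invariant: from index j (< n) on, A's loop returns B's fold over the remaining
-- split positions, started with prefix sum (arr.take j).sum.
lemma goA_eq_goB (arr : List Int) :
    ∀ (m j : Nat), arr.length - j = m → j < arr.length → ∀ (cnt left : Int),
      goA arr arr.length (PySem.List.pyRange j arr.length 1) cnt left
        = some (goB ((arr.drop j).dropLast) arr.sum ((arr.take j).sum) cnt) := by
  intro m
  induction m with
  | zero => intro j hm hj cnt left; omega
  | succ m ih =>
    intro j hm hj cnt left
    have hjlt : (j : Int) < (arr.length : Int) := by exact_mod_cast hj
    rw [PySem.List.pyRange_one_cons hjlt]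
    by_cases hlast : j + 1 = arr.length
    · -- last index: A returns cnt; B's remaining list is empty
      have h1 : (j : Int) = (arr.length : Int) - 1 := by omega
      have h2 : (arr.drop j).dropLast = [] := by
        have : (arr.drop j).length = 1 := by simp [List.length_drop]; omega
        match hd : arr.drop j with
        | [] => simp
        | [a] => simp
        | a :: b :: t => simp [hd] at this
      simp [goA, h1, h2, goB]
    · -- j + 1 < length: unfold one step of each side
      have hj1 : j + 1 < arr.length := by omega
      have hne : (j : Int) ≠ (arr.length : Int) - 1 := by
        intro h; omega
      have hl : (PySem.List.slice arr (some 0) (some ((j : Int) + 1))).sum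
          = (arr.take (j + 1)).sum := by
        have : ((j : Int) + 1) = ((j + 1 : Nat) : Int) := by push_cast; ring
        rw [this, PySem.List.slice_zero_start, PySem.List.slice_to_natCast]
      have hr : (PySem.List.slice arr (some ((j : Int) + 1)) (some (arr.length : Int))).sum
          = (arr.drop (j + 1)).sum := by
        have : ((j : Int) + 1) = ((j + 1 : Nat) : Int) := by push_cast; ring
        rw [this, PySem.List.slice_natCast]
        congr 1
        exact List.take_of_length_le (by simp [List.length_drop])
      have htotal : arr.sum = (arr.take (j + 1)).sum + (arr.drop (j + 1)).sum := by
        rw [← List.sum_append, List.take_append_drop]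
      have hsucc : (arr.take (j + 1)).sum = (arr.take j).sum + arr[j] :=
        List.sum_take_succ arr j hj
      have hdrop : arr.drop j = arr[j] :: arr.drop (j + 1) :=
        List.drop_eq_getElem_cons hj
      have hdl : (arr.drop j).dropLast = arr[j] :: (arr.drop (j + 1)).dropLast := by
        rw [hdrop, List.dropLast_cons_of_ne_nil]
        intro h
        have := congrArg List.length h
        simp [List.length_drop] at this
        omega
      have hcast : ((j : Int) + 1) = ((j + 1 : Nat) : Int) := by push_cast; ring
      rw [hcast] at hl hr
      simp only [goA, if_neg hne, hdl, goB, hcast, ← hsucc]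
      rw [hl, hr, ih (j + 1) (by omega) hj1]
      congr 1
      by_cases hc : (arr.take (j + 1)).sum ≥ (arr.drop (j + 1)).sum
      · rw [if_pos hc, if_pos (by omega)]
      · rw [if_neg hc, if_neg (by omega)]

-- ===== VERDICT (by name: the statement is the Claim_ definition above) =====
theorem split_array_brute_spec : Claim_equal_split_array_brute := by
  intro arr _hdom hpre
  unfold Spec_split_array_brute split_array_brute split_array_brute_alt
  have hlen : 0 < arr.length := List.length_pos_of_ne_nil hpre
  have h := goA_eq_goB arr arr.length 0 (by omega) hlen 0 0
  simp only [Nat.cast_zero] at h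
  rw [h, PySem.List.slice_to_neg_one]
  simp
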